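-- pv_equiv track=rewrite | github.com/razkaplan/smart-expense-tracker | app.py | is_latin
-- ===== SOURCE A (Python) =====
-- def is_latin(text):
--     """Check if text contains Latin characters"""
--     # Normalize text and remove non-alphabetic characters
--     if text is None:
--         return False
--
--     # Convert to string if not already
--     text = str(text)
--
--     # Keep only alphabetic characters
--     text = ''.join(char for char in text if char.isalpha() or char.isspace())
--
--     # Check if any Latin characters are present
--     latin_chars = "ABCDEFGHIJKLMNOPQRSTUVWXYZabcdefghijklmnopqrstuvwxyz"
--
--     # Use string comparison instead of set operations
--     for char in text:
--         if char in latin_chars: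
--             return True
--     return False
-- ===== SOURCE B (Python) =====
-- def is_latin(text):
--     """Check if text contains Latin characters"""
--     if text is None:
--         return False
--     return bool(set(str(text)) & set("ABCDEFGHIJKLMNOPQRSTUVWXYZabcdefghijklmnopqrstuvwxyz"))
-- ===== Notes on version B (the rewrite author's own statement) =====
-- stated objective: simpler
-- what changed: Replaced A's filter pass plus early-exit character scan against the 52-char alphabet string with a single set intersection between the input's character set and the Latin-alphabet set.
import Mathlib
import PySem

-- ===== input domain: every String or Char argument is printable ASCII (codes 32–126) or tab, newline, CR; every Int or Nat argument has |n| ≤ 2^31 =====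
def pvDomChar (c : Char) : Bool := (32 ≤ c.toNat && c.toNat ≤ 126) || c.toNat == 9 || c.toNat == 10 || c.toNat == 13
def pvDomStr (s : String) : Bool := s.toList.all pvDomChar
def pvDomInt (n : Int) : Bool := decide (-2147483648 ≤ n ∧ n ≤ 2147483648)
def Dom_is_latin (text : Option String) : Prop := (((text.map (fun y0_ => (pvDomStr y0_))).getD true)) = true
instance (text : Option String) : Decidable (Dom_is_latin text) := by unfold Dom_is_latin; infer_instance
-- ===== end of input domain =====

-- B replaces the filter pass and early-exit scan with a set intersection (objective: simpler).
-- ===== PORT A =====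
def pvLatinChars : List Char := "ABCDEFGHIJKLMNOPQRSTUVWXYZabcdefghijklmnopqrstuvwxyz".toList

def is_latin (text : Option String) : Bool :=
  match text with
  | none => false
  | some t =>
    -- text = ''.join(char for char in text if char.isalpha() or char.isspace())
    let filtered := t.toList.filter (fun c => PySem.Chars.isalpha c || PySem.Chars.isspace c)
    -- for char in text: if char in latin_chars: return True / return False
    filtered.any (fun c => PySem.Chars.isIn [c] pvLatinChars)

-- ===== PORT B =====
def is_latin_alt (text : Option String) : Bool :=
  match text with
  | none => false
  | some t =>
    -- bool(set(str(text)) & set(latin))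
    !(PySem.Set.inter (PySem.Set.ofList t.toList) (PySem.Set.ofList pvLatinChars)).isEmpty

-- ===== PRECONDITION & SPEC =====
def Spec_is_latin (text : Option String) (out : Bool) : Prop := out = is_latin_alt text
instance (text : Option String) (out : Bool) : Decidable (Spec_is_latin text out) := by unfold Spec_is_latin; infer_instance

-- ===== CLAIM (what is proved, stated in full; the proofs are below) =====
def Claim_equal_is_latin : Prop := ∀ (text : Option String), Dom_is_latin text → Spec_is_latin text (is_latin text)

-- ===== LEMMAS AND PROOFS =====

-- ===== VERDICT (by name: the statement is the Claim_ definition above) =====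
lemma latin_isalpha : ∀ c ∈ pvLatinChars, PySem.Chars.isalpha c = true := by
  have h : pvLatinChars.all PySem.Chars.isalpha = true := by rfl
  simpa [List.all_eq_true] using h

lemma isIn_singleton (c : Char) (l : List Char) :
    PySem.Chars.isIn [c] l = l.contains c := by
  cases hm : l.contains c
  · rw [PySem.Chars.isIn_eq_false_iff, List.singleton_infix_iff]
    simpa using hm
  · rw [PySem.Chars.isIn_iff_infix, List.singleton_infix_iff]
    simpa using hm

lemma is_latin_eq (s : String) :
    is_latin (some s) = s.toList.any (fun c => pvLatinChars.contains c) := by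
  apply Bool.eq_iff_iff.mpr
  simp only [is_latin, List.any_eq_true, List.mem_filter, isIn_singleton,
    List.contains_iff_mem]
  constructor
  · rintro ⟨c, ⟨hc, _⟩, hl⟩; exact ⟨c, hc, hl⟩
  · rintro ⟨c, hc, hl⟩
    exact ⟨c, ⟨hc, by simp [latin_isalpha c hl]⟩, hl⟩

lemma is_latin_alt_eq (s : String) :
    is_latin_alt (some s) = s.toList.any (fun c => pvLatinChars.contains c) := by
  apply Bool.eq_iff_iff.mpr
  simp only [is_latin_alt, Bool.not_eq_eq_eq_not, Bool.not_true, List.isEmpty_eq_false_iff,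
    List.any_eq_true, List.contains_iff_mem, ne_eq, List.eq_nil_iff_forall_not_mem,
    not_forall, not_not, PySem.Set.mem_inter, PySem.Set.mem_ofList]

theorem is_latin_spec : Claim_equal_is_latin := by
  intro text _
  unfold Spec_is_latin
  cases text with
  | none => rfl
  | some s => rw [is_latin_eq, is_latin_alt_eq]
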